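-- pv_equiv track=rewrite | github.com/OriRotter/Cyber-Lessons | Homework/ex1.py | sentenceHexToNum
-- ===== SOURCE A (Python) =====
-- def sentenceHexToNum(numS,base):
--     for i in numS:
--         try:
--             int(i,base)
--         except(ValueError):
--             numS = numS.replace(i,'z')
--     numS = numS.split('z')
--
--
--     sum = 0
--     for i in numS:
--         try:
--             sum += int(i,base)
--         except(ValueError):
--             pass
--     return sum
-- ===== SOURCE B (Python) =====
-- _DIGITS = "0123456789abcdefghijklmnopqrstuvwxyz"
--
--
-- def sentenceHexToNum(numS, base):
--     """Sum the values of the maximal base-`base` digit runs in numS."""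
--     if not 2 <= base <= 36:
--         return 0
--     digits = _DIGITS[:base]
--     total = 0
--     run = ""
--     for ch in numS:
--         if ch.lower() in digits:
--             run += ch
--         else:
--             if run:
--                 total += int(run, base)
--             run = ""
--     if run:
--         total += int(run, base)
--     return total
-- ===== Notes on version B (the rewrite author's own statement) =====
-- stated objective: faster
-- what changed: A rescans the whole string with str.replace for every character, then splits on a 'z' sentinel and re-parses; B makes one linear pass testing each character against the base's digit alphabet and summing int(run, base) per maximal run. Pre_ excludes base 0, where A inherits int()'s auto-base literal parsing while B supports explicit bases only, and base-36 inputs containing 'z', where A's split sentinel coincides with the valid digit 'z' so separator-vs-digit is an unspecified corner (B reads 'z' as the digit 35).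
-- outside the precondition, e.g. on sentenceHexToNum('12', 0): A returns 12, B returns 0; on sentenceHexToNum('z', 36): A returns 0, B returns 35
import Mathlib
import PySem

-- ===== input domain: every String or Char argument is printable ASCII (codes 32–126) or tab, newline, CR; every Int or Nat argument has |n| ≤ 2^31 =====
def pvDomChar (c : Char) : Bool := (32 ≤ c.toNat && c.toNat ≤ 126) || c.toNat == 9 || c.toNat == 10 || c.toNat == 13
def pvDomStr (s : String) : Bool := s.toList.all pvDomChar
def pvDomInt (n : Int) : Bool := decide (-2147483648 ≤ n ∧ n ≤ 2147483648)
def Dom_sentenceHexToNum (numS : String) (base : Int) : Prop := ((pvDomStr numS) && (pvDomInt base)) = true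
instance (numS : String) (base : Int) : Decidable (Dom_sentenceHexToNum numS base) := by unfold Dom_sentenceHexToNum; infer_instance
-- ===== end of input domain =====

-- B replaces A's quadratic pipeline (a whole-string str.replace per character, then a split
-- and re-parse) by one linear pass over the string summing each maximal digit run (faster).

-- ===== PORT A =====
def sentenceHexToNum (numS : String) (base : Int) : Int :=
  -- for i in numS: try int(i, base) except ValueError: numS = numS.replace(i, 'z')
  let s0 := numS.toList
  let s1 := s0.foldl (fun cur c =>
      match PySem.Int.ofCharsBase? [c] base with
      | some _ => cur
      | none   => PySem.Chars.replace cur [c] ['z']) s0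
  -- numS = numS.split('z')
  let parts := PySem.Chars.splitOn s1 ['z']
  -- sum = 0; for i in numS: try sum += int(i, base) except ValueError: pass
  parts.foldl (fun sum p =>
      match PySem.Int.ofCharsBase? p base with
      | some v => sum + v
      | none   => sum) 0

-- ===== PORT B =====
-- B: one linear pass; a character extends the current run iff its lower-case form is in the
-- base's digit alphabet _DIGITS[:base]; each finished non-empty run contributes int(run, base).
-- _DIGITS = "0123456789abcdefghijklmnopqrstuvwxyz"
def pvDigitsAll : List Char :=
  ['0','1','2','3','4','5','6','7','8','9','a','b','c','d','e','f','g','h',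
   'i','j','k','l','m','n','o','p','q','r','s','t','u','v','w','x','y','z']

def sentenceHexToNum_alt (numS : String) (base : Int) : Int :=
  if ¬(2 ≤ base ∧ base ≤ 36) then 0
  else
    let digits := PySem.List.slice pvDigitsAll none (some base)   -- _DIGITS[:base]
    -- int(run, base) never raises here: run is a nonempty string of digit chars below base
    -- with 2 ≤ base, so getD's default is unreachable inside this function
    let st := numS.toList.foldl (fun (st : Int × List Char) ch =>
        if PySem.Chars.isIn [PySem.Chars.lowerChar ch] digits then (st.1, st.2 ++ [ch])
        else (if st.2 ≠ [] then st.1 + (PySem.Int.ofCharsBase? st.2 base).getD 0 else st.1,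
              ([] : List Char))) (0, ([] : List Char))
    if st.2 ≠ [] then st.1 + (PySem.Int.ofCharsBase? st.2 base).getD 0 else st.1

-- ===== PRECONDITION & SPEC =====
-- Pre_ excludes base 0, where A inherits int()'s auto-base literal parsing while B supports
-- explicit bases only, and base-36 inputs containing 'z', where A's split sentinel coincides
-- with the valid digit 'z' so separator-vs-digit is an unspecified corner (B reads 'z' as 35).
def Pre_sentenceHexToNum (numS : String) (base : Int) : Prop :=
  base ≠ 0 ∧ ¬(base = 36 ∧ 'z' ∈ numS.toList)
instance (numS : String) (base : Int) : Decidable (Pre_sentenceHexToNum numS base) := by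
  unfold Pre_sentenceHexToNum; infer_instance

def pvWitness_sentenceHexToNum : String × Int := ("a1 ff 2", 16)

def Spec_sentenceHexToNum (numS : String) (base : Int) (out : Int) : Prop :=
  out = sentenceHexToNum_alt numS base
instance (numS : String) (base : Int) (out : Int) : Decidable (Spec_sentenceHexToNum numS base out) := by
  unfold Spec_sentenceHexToNum; infer_instance

-- ===== CLAIM =====
def Claim_equal_sentenceHexToNum : Prop := ∀ (numS : String) (base : Int),
  Dom_sentenceHexToNum numS base → Pre_sentenceHexToNum numS base →
  Spec_sentenceHexToNum numS base (sentenceHexToNum numS base)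

-- ===== LEMMAS AND PROOFS =====

-- int(cs, base) raises for every string when base is not 0 nor in [2, 36]
theorem ofCharsBase?_badbase (cs : List Char) (base : Int)
    (h : ¬(base = 0 ∨ 2 ≤ base ∧ base ≤ 36)) : PySem.Int.ofCharsBase? cs base = none := by
  simp only [PySem.Int.ofCharsBase?]
  rw [if_pos h]

-- per-character agreement of A's int() probe with B's digit-alphabet membership test,
-- enumerated over all usable bases and printable ASCII
theorem charFacts : ∀ b : Nat, b < 37 → 2 ≤ b → ∀ n : Nat, n < 127 →
    ((PySem.Int.ofCharsBase? [Char.ofNat n] (b : Int)).isSome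
      = PySem.Chars.isIn [PySem.Chars.lowerChar (Char.ofNat n)]
          (PySem.List.slice pvDigitsAll none (some (b : Int)))) := by
  set_option maxRecDepth 10000 in decide

-- below base 36, 'z' is not in the digit alphabet
theorem zNotDigit : ∀ b : Nat, b < 36 →
    PySem.Chars.isIn [PySem.Chars.lowerChar 'z']
      (PySem.List.slice pvDigitsAll none (some (b : Int))) = false := by
  decide

theorem ofCharsBase?_nil (b : Nat) (hb : b < 37) :
    PySem.Int.ofCharsBase? ([] : List Char) (b : Int) = none := by
  revert b; decide

-- Python's str.replace with a single-character pattern is a map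
theorem replace_go_single (a : Char) (l : List Char) : ∀ (fuel : Nat) (acc : List Char),
    l.length ≤ fuel →
    PySem.Chars.replace.go [a] ['z'] fuel l acc
      = acc.reverse ++ l.map (fun c => if c = a then 'z' else c) := by
  induction l with
  | nil =>
    intro fuel acc _
    cases fuel <;> simp [PySem.Chars.replace.go]
  | cons c t ih =>
    intro fuel acc hf
    cases fuel with
    | zero => simp at hf
    | succ m =>
      rw [PySem.Chars.replace.go]
      simp only [List.isPrefixOf, List.length_cons] at *
      by_cases hca : a = c
      · subst hca
        simp only [BEq.rfl, Bool.true_and, if_true]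
        simp only [List.length_nil, List.drop_succ_cons, List.drop_zero]
        rw [ih m _ (by omega)]
        simp
      · rw [if_neg (by simp [beq_iff_eq]; exact hca)]
        rw [ih m _ (by omega)]
        simp only [List.reverse_cons, List.append_assoc, List.singleton_append, List.map_cons]
        rw [if_neg (fun h : c = a => hca h.symm)]

theorem replace_single (a : Char) (s : List Char) :
    PySem.Chars.replace s [a] ['z'] = s.map (fun c => if c = a then 'z' else c) := by
  simp only [PySem.Chars.replace, List.isEmpty, Bool.false_eq_true, if_false]
  rw [replace_go_single a s s.length [] (le_refl _)]
  simp

theorem modifyHead_fun_id {α : Type} (l : List α) : List.modifyHead (fun x => x) l = l := by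
  cases l <;> simp

-- Python's split('z') is List.splitOnP (· == 'z')
theorem splitOn_go_z (l : List Char) : ∀ (fuel : Nat) (cur : List Char) (acc : List (List Char)),
    l.length ≤ fuel →
    PySem.Chars.splitOn.go ['z'] fuel l cur acc
      = acc.reverse ++ (l.splitOnP (· == 'z')).modifyHead (cur.reverse ++ ·) := by
  induction l with
  | nil =>
    intro fuel cur acc _
    cases fuel <;> simp [PySem.Chars.splitOn.go, List.splitOnP_nil]
  | cons c t ih =>
    intro fuel cur acc hf
    cases fuel with
    | zero => simp at hf
    | succ m =>
      rw [PySem.Chars.splitOn.go]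
      simp only [List.isPrefixOf, List.length_cons] at *
      by_cases hcz : c = 'z'
      · subst hcz
        simp only [BEq.rfl, Bool.true_and, if_true]
        simp only [show (0+1 : Nat) = 1 from rfl, List.length_nil, List.drop_one, List.tail_cons]
        rw [ih m _ _ (by omega)]
        simp only [List.splitOnP_cons, BEq.rfl, if_true, List.modifyHead_cons,
          List.reverse_cons, List.append_assoc, List.singleton_append, List.append_nil]
        exact (modifyHead_fun_id _).symm ▸ rfl
      · rw [if_neg (by simp [beq_iff_eq]; exact fun h => hcz h.symm)]
        rw [ih m _ _ (by omega)]
        simp only [List.splitOnP_cons, beq_iff_eq, if_neg hcz]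
        rw [List.modifyHead_modifyHead]
        simp [Function.comp_def]

theorem splitOn_z (s : List Char) :
    PySem.Chars.splitOn s ['z'] = s.splitOnP (· == 'z') := by
  simp only [PySem.Chars.splitOn]
  rw [splitOn_go_z s (s.length + 1) [] [] (by omega)]
  simpa using modifyHead_fun_id (List.splitOnP (fun x => x == 'z') s)

-- A's first loop: folding replace over the characters masks exactly the invalid characters
theorem phase1 (base : Int) (s : List Char) : ∀ (l : List Char) (q : Char → Bool),
    l.foldl (fun cur c =>
      match PySem.Int.ofCharsBase? [c] base with
      | some _ => cur
      | none   => PySem.Chars.replace cur [c] ['z'])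
      (s.map (fun c => if q c then 'z' else c))
    = s.map (fun c =>
        if (q c || (l.contains c && !(PySem.Int.ofCharsBase? [c] base).isSome)) then 'z' else c) := by
  intro l
  induction l with
  | nil => intro q; simp
  | cons c0 l' ih =>
    intro q
    simp only [List.foldl_cons]
    rcases h : PySem.Int.ofCharsBase? [c0] base with _ | v
    · rw [replace_single c0]
      rw [List.map_map]
      have : ((fun c => if c = c0 then 'z' else c) ∘ fun c => if q c then 'z' else c)
          = fun c => if (fun x => q x || x == c0) c then 'z' else c := by
        funext c
        simp only [Function.comp_apply]
        by_cases hq : q c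
        · simp [hq]
        · by_cases hc : c = c0
          · subst hc; simp [hq]
          · simp [hq, hc]
      rw [this, ih]
      apply List.map_congr_left
      intro c _
      by_cases hc : c = c0
      · subst hc; simp [h]
      · simp [hc]
    · rw [ih]
      apply List.map_congr_left
      intro c _
      by_cases hc : c = c0
      · subst hc; simp [h]
      · simp [hc]

theorem phase1_final (base : Int) (s : List Char) :
    s.foldl (fun cur c =>
      match PySem.Int.ofCharsBase? [c] base with
      | some _ => cur
      | none   => PySem.Chars.replace cur [c] ['z']) s
    = s.map (fun c => if (PySem.Int.ofCharsBase? [c] base).isSome then c else 'z') := by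
  have h1 := phase1 base s s (fun _ => false)
  rw [show (s.map fun c => if (fun _ => false) c = true then 'z' else c) = s from by simp] at h1
  rw [h1]
  apply List.map_congr_left
  intro c hc
  rcases h : (PySem.Int.ofCharsBase? [c] base).isSome <;> simp [h, hc]

-- splitting the masked string on 'z' = splitting the original string on non-digit characters,
-- provided no digit character of the string is itself 'z'
theorem splitOnP_mask (p : Char → Bool) (s : List Char)
    (hz : ∀ c ∈ s, p c = true → c ≠ 'z') :
    ((s.map (fun c => if p c then c else 'z')).splitOnP (· == 'z'))
      = s.splitOnP (fun c => !(p c)) := by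
  induction s with
  | nil => simp [List.splitOnP_nil]
  | cons c t ih =>
    simp only [List.map_cons, List.splitOnP_cons]
    have iht := ih (fun x hx hp => hz x (List.mem_cons_of_mem c hx) hp)
    by_cases hg : p c
    · rw [if_pos hg]
      have : (c == 'z') = false := by simp [hz c (List.mem_cons_self) hg]
      simp [this, hg, iht]
    · rw [if_neg hg]
      simp only [Bool.not_eq_true] at hg
      simp [hg, iht]

-- the summing loop over the pieces, as a sum of per-piece contributions
theorem foldl_match_sum (base : Int) : ∀ (l : List (List Char)) (a : Int),
    l.foldl (fun sum p => match PySem.Int.ofCharsBase? p base with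
      | some v => sum + v
      | none   => sum) a
    = a + (l.map (fun p => (PySem.Int.ofCharsBase? p base).getD 0)).sum := by
  intro l
  induction l with
  | nil => intro a; simp
  | cons p l' ih =>
    intro a
    simp only [List.foldl_cons, List.map_cons, List.sum_cons]
    rcases h : PySem.Int.ofCharsBase? p base with _ | v <;> simp [h, ih] <;> ring

-- B's loop invariant: the fold computes the piecewise sum of the pending run and the rest,
-- each non-empty piece contributing int(piece, base)
theorem bfold (p : Char → Bool) (base : Int) :
    ∀ (s : List Char) (t : Int) (r : List Char), (∀ c ∈ r, p c = true) →
    (let st := s.foldl (fun (st : Int × List Char) ch =>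
        if p ch then (st.1, st.2 ++ [ch])
        else (if st.2 ≠ [] then st.1 + (PySem.Int.ofCharsBase? st.2 base).getD 0 else st.1,
              ([] : List Char))) (t, r);
     if st.2 ≠ [] then st.1 + (PySem.Int.ofCharsBase? st.2 base).getD 0 else st.1)
    = t + (((r ++ s).splitOnP (fun c => !(p c))).map
        (fun q => if q = [] then 0 else (PySem.Int.ofCharsBase? q base).getD 0)).sum := by
  intro s
  induction s with
  | nil =>
    intro t r hr
    simp only [List.foldl_nil, List.append_nil]
    rw [List.splitOnP_eq_single _ r (by intro c hc; simp [hr c hc])]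
    rcases hre : r with _ | ⟨c, r'⟩ <;> simp
  | cons c s' ih =>
    intro t r hr
    simp only [List.foldl_cons]
    by_cases hg : p c
    · rw [if_pos hg]
      have := ih t (r ++ [c]) (by
        intro x hx
        rcases List.mem_append.mp hx with hx | hx
        · exact hr x hx
        · simp at hx; subst hx; exact hg)
      simpa [List.append_assoc] using this
    · rw [if_neg hg]
      have hstep := ih (if r ≠ [] then t + (PySem.Int.ofCharsBase? r base).getD 0 else t) []
        (by intro x hx; simp at hx)
      simp only [List.nil_append] at hstep
      rw [hstep]
      rw [List.splitOnP_first _ r (by intro x hx; simp [hr x hx]) c (by simp [hg]) s']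
      simp only [List.map_cons, List.sum_cons]
      rcases r with _ | ⟨x, r'⟩ <;> simp <;> ring

-- ===== VERDICT =====
theorem sentenceHexToNum_spec : Claim_equal_sentenceHexToNum := by
  intro numS base hdom hpre
  obtain ⟨hpre0, hnd⟩ := hpre
  unfold Spec_sentenceHexToNum sentenceHexToNum sentenceHexToNum_alt
  by_cases hb : 2 ≤ base ∧ base ≤ 36
  · -- usable base
    rw [if_neg (by simp [hb.1, hb.2])]
    obtain ⟨h2, h36⟩ := hb
    have hbn : base = ((base.toNat : Nat) : Int) := (Int.toNat_of_nonneg (by omega)).symm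
    have h37 : base.toNat < 37 := by omega
    have hb2 : 2 ≤ base.toNat := by omega
    have hdomS : ∀ c ∈ numS.toList, pvDomChar c = true := by
      have : pvDomStr numS = true := by
        unfold Dom_sentenceHexToNum at hdom
        simp only [Bool.and_eq_true] at hdom
        exact hdom.1
      simpa [pvDomStr, List.all_eq_true] using this
    -- per-character: A's int() probe = B's digit-alphabet membership
    have hok : ∀ c ∈ numS.toList,
        (PySem.Int.ofCharsBase? [c] base).isSome
          = PySem.Chars.isIn [PySem.Chars.lowerChar c]
              (PySem.List.slice pvDigitsAll none (some base)) := by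
      intro c hc
      have hd := hdomS c hc
      have hn : c.toNat < 127 := by
        simp only [pvDomChar, Bool.or_eq_true, Bool.and_eq_true, decide_eq_true_eq,
          Nat.beq_eq_true_eq] at hd
        omega
      have := charFacts base.toNat h37 hb2 c.toNat hn
      rwa [Char.ofNat_toNat c, ← hbn] at this
    -- no digit character of the string is 'z' (outside D_)
    have hz : ∀ c ∈ numS.toList,
        PySem.Chars.isIn [PySem.Chars.lowerChar c]
          (PySem.List.slice pvDigitsAll none (some base)) = true → c ≠ 'z' := by
      intro c hc ht he
      subst he
      by_cases h36' : base = 36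
      · have hznotin : 'z' ∉ numS.toList := by simpa [h36'] using hnd
        exact hznotin hc
      · have hlt : base.toNat < 36 := by omega
        have := zNotDigit base.toNat hlt
        rw [← hbn] at this
        rw [this] at ht
        exact Bool.false_ne_true ht
    dsimp only
    rw [phase1_final base numS.toList]
    have hmask : numS.toList.map
          (fun c => if (PySem.Int.ofCharsBase? [c] base).isSome then c else 'z')
        = numS.toList.map (fun c =>
            if PySem.Chars.isIn [PySem.Chars.lowerChar c]
                (PySem.List.slice pvDigitsAll none (some base)) then c else 'z') := by
      apply List.map_congr_left
      intro c hc
      rw [hok c hc]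
    rw [hmask, splitOn_z, splitOnP_mask _ _ hz, foldl_match_sum]
    have hbf := bfold (fun ch => PySem.Chars.isIn [PySem.Chars.lowerChar ch]
        (PySem.List.slice pvDigitsAll none (some base))) base numS.toList 0 []
        (by intro x hx; simp at hx)
    simp only [List.nil_append] at hbf
    rw [hbf]
    congr 1
    apply congrArg List.sum
    apply List.map_congr_left
    intro q _
    rcases hq : q with _ | ⟨x, q'⟩
    · rw [hbn, ofCharsBase?_nil base.toNat h37]
      simp
    · simp
  · -- base outside 2..36 (and ≠ 0): A sums nothing, B returns 0 immediately
    rw [if_pos hb]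
    have hnone : ∀ p : List Char, PySem.Int.ofCharsBase? p base = none := by
      intro p
      exact ofCharsBase?_badbase p base (by
        intro h
        rcases h with h0 | hr
        · exact hpre0 h0
        · exact hb hr)
    dsimp only
    generalize (PySem.Chars.splitOn _ _) = parts
    induction parts with
    | nil => rfl
    | cons p l ih => simp only [List.foldl_cons, hnone p]; exact ih
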